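-- pv_equiv track=rewrite | github.com/navigating-stories/orange-story-navigator | orangecontrib/storynavigation/widgets/OWSNNarrativeNetwork.py | _merge_binary_tuplelsts_into_ternary_tuplelst
-- ===== SOURCE A (Python) =====
-- def _merge_binary_tuplelsts_into_ternary_tuplelst(list1, list2):
--     merged_list = []
--     for tuple1 in list1:
--         foundMatch = False
--         for tuple2 in list2:
--             if tuple1[1] == tuple2[0]:
--                 foundMatch = True
--                 merged_list.append((tuple1[0], tuple1[1], tuple2[1]))
--         if not foundMatch:
--             merged_list.append((tuple1[0], tuple1[1], 'O'))
--
--     return merged_list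
-- ===== SOURCE B (Python) =====
-- def _merge_binary_tuplelsts_into_ternary_tuplelst(list1, list2):
--     index = {}
--     for k, v in list2:
--         index.setdefault(k, []).append(v)
--     out = []
--     for a, b in list1:
--         vs = index.get(b, [])
--         if vs:
--             for v in vs:
--                 out.append((a, b, v))
--         else:
--             out.append((a, b, 'O'))
--     return out
-- ===== Notes on version B (the rewrite author's own statement) =====
-- stated objective: alternative
-- what changed: Replaces the nested scan of list2 for every tuple of list1 by a dict built once from list2 (key -> ordered value list) and a single lookup per tuple of list1.
import Mathlib
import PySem

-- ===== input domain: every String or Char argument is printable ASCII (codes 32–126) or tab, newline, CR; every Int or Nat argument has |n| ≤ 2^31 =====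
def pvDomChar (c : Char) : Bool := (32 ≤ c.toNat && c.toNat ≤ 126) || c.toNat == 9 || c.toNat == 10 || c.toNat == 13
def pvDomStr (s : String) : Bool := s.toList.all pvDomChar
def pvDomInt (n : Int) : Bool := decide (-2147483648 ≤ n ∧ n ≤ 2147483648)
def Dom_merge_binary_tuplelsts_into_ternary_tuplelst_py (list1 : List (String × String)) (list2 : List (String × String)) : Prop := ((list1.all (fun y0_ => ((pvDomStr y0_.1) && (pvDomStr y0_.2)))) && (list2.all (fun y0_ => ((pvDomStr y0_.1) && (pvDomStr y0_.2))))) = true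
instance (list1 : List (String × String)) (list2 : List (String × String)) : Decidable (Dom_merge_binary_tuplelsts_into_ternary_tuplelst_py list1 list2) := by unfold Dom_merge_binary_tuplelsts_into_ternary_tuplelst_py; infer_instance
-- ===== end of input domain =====

-- ===== PORT A =====
-- B replaces A's nested scan of list2 per tuple of list1 by a dict built once from list2 plus one lookup per tuple of list1 (an alternative algorithm; no speed is claimed).
def merge_binary_tuplelsts_into_ternary_tuplelst_py (list1 : List (String × String)) (list2 : List (String × String)) : List (String × String × String) :=
  list1.foldl (fun merged t1 =>
    let st := list2.foldl (fun (s : Bool × List (String × String × String)) t2 =>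
      if t1.2 == t2.1 then (true, s.2 ++ [(t1.1, t1.2, t2.2)]) else s) (false, merged)
    if !st.1 then st.2 ++ [(t1.1, t1.2, "O")] else st.2) []

-- ===== PORT B =====
def merge_binary_tuplelsts_into_ternary_tuplelst_py_alt (list1 : List (String × String)) (list2 : List (String × String)) : List (String × String × String) :=
  let index := list2.foldl (fun d p => d.modify p.1 [] (· ++ [p.2])) (PySem.Dict.empty : PySem.Dict String (List String))
  list1.foldl (fun out p =>
    let vs := index.getD p.2 []
    if vs ≠ [] then out ++ vs.map (fun v => (p.1, p.2, v)) else out ++ [(p.1, p.2, "O")]) []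

-- ===== PRECONDITION & SPEC =====
def Spec_merge_binary_tuplelsts_into_ternary_tuplelst_py (list1 : List (String × String)) (list2 : List (String × String)) (out : List (String × String × String)) : Prop := out = merge_binary_tuplelsts_into_ternary_tuplelst_py_alt list1 list2
instance (list1 : List (String × String)) (list2 : List (String × String)) (out : List (String × String × String)) : Decidable (Spec_merge_binary_tuplelsts_into_ternary_tuplelst_py list1 list2 out) := by unfold Spec_merge_binary_tuplelsts_into_ternary_tuplelst_py; infer_instance

-- ===== CLAIM (what is proved, stated in full; the proofs are below) =====
def Claim_equal_merge_binary_tuplelsts_into_ternary_tuplelst_py : Prop := ∀ (list1 : List (String × String)) (list2 : List (String × String)), Dom_merge_binary_tuplelsts_into_ternary_tuplelst_py list1 list2 → Spec_merge_binary_tuplelsts_into_ternary_tuplelst_py list1 list2 (merge_binary_tuplelsts_into_ternary_tuplelst_py list1 list2)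

-- ===== LEMMAS AND PROOFS =====

-- A's inner loop over list2 collects, in order, the matches of t1.2 and records whether one was found.
theorem pv_innerA (a b : String) (l2 : List (String × String)) (found : Bool)
    (acc : List (String × String × String)) :
    l2.foldl (fun (s : Bool × List (String × String × String)) t2 =>
      if b == t2.1 then (true, s.2 ++ [(a, b, t2.2)]) else s) (found, acc)
    = (found || !(l2.filter (fun p => p.1 == b)).isEmpty,
       acc ++ (l2.filter (fun p => p.1 == b)).map (fun p => (a, b, p.2))) := by
  induction l2 generalizing found acc with
  | nil => simp
  | cons hd t ih =>
    simp only [List.foldl_cons, List.filter_cons]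
    by_cases hb : b = hd.1
    · have h1 : (b == hd.1) = true := by simp [hb]
      have h2 : (hd.1 == b) = true := by simp [hb.symm]
      simp only [h1, h2]
      rw [ih]
      simp [List.append_assoc]
    · have h1 : (b == hd.1) = false := by simp [hb]
      have h2 : (hd.1 == b) = false := by simp [Ne.symm hb]
      simp only [h1, h2, Bool.false_eq_true]
      exact ih found acc

-- The per-element step of A equals the per-element step of B.
theorem pv_step (a b : String) (l2 : List (String × String))
    (acc : List (String × String × String)) :
    (let st := l2.foldl (fun (s : Bool × List (String × String × String)) t2 =>
        if b == t2.1 then (true, s.2 ++ [(a, b, t2.2)]) else s) (false, acc)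
     if !st.1 then st.2 ++ [(a, b, "O")] else st.2)
    = (let vs := ((l2.filter (fun p => p.1 == b)).map (fun p => p.2))
       if vs ≠ [] then acc ++ vs.map (fun v => (a, b, v)) else acc ++ [(a, b, "O")]) := by
  rw [pv_innerA]
  by_cases hm : (l2.filter (fun p => p.1 == b)) = []
  · simp [hm]
  · simp [hm, List.isEmpty_iff, List.map_map, Function.comp_def]

-- ===== VERDICT (by name: the statement is the Claim_ definition above) =====
theorem merge_binary_tuplelsts_into_ternary_tuplelst_py_spec : Claim_equal_merge_binary_tuplelsts_into_ternary_tuplelst_py := by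
  intro list1 list2 _
  unfold Spec_merge_binary_tuplelsts_into_ternary_tuplelst_py
  unfold merge_binary_tuplelsts_into_ternary_tuplelst_py merge_binary_tuplelsts_into_ternary_tuplelst_py_alt
  have hidx : ∀ b : String,
      (list2.foldl (fun d p => d.modify p.1 [] (· ++ [p.2]))
        (PySem.Dict.empty : PySem.Dict String (List String))).getD b []
      = (list2.filter (fun p => p.1 == b)).map (fun p => p.2) := by
    intro b
    simpa using PySem.Dict.getD_foldl_modify_append list2 PySem.Dict.empty b
  refine PySem.List.foldl_congr_mem list1 _ _ [] ?_
  intro acc p _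
  simp only [hidx p.2]
  simpa using pv_step p.1 p.2 list2 acc
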